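-- pv_equiv track=rewrite | github.com/Arun7303/career-pathway-Agentic-AI | rl_models/reinforcement_learner.py | _categorize_interests
-- ===== SOURCE A (Python) =====
-- from typing import Dict, List, Any, Tuple, Optional
--
-- def _categorize_interests(interests: List[str]) -> int:
--     """Categorize interests into numerical code"""
--     tech_interests = ['programming', 'software', 'web development', 'cybersecurity', 'data science', 'ai', 'machine learning']
--     business_interests = ['management', 'marketing', 'finance', 'entrepreneurship']
--     creative_interests = ['design', 'art', 'music', 'writing']
--
--     if any(interest.lower() in tech_interests for interest in interests):
--         return 0  # Technical
--     elif any(interest.lower() in business_interests for interest in interests):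
--         return 1  # Business
--     elif any(interest.lower() in creative_interests for interest in interests):
--         return 2  # Creative
--     else:
--         return 3  # Other
-- ===== SOURCE B (Python) =====
-- def _categorize_interests(interests):
--     """Categorize interests into numerical code"""
--     codes = {
--         'programming': 0, 'software': 0, 'web development': 0, 'cybersecurity': 0,
--         'data science': 0, 'ai': 0, 'machine learning': 0,
--         'management': 1, 'marketing': 1, 'finance': 1, 'entrepreneurship': 1,
--         'design': 2, 'art': 2, 'music': 2, 'writing': 2,
--     }
--     best = 3
--     for interest in interests:
--         best = min(best, codes.get(interest.lower(), 3))
--     return best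
-- ===== Notes on version B (the rewrite author's own statement) =====
-- stated objective: simpler
-- what changed: Replaces the three separate any()-membership scans over keyword lists by one keyword->code dict built once and a single pass over the interests tracking the minimum matched code (default 3); the minimum equals the priority-ordered first match because 0<1<2<3 and the keyword lists are disjoint.
import Mathlib
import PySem

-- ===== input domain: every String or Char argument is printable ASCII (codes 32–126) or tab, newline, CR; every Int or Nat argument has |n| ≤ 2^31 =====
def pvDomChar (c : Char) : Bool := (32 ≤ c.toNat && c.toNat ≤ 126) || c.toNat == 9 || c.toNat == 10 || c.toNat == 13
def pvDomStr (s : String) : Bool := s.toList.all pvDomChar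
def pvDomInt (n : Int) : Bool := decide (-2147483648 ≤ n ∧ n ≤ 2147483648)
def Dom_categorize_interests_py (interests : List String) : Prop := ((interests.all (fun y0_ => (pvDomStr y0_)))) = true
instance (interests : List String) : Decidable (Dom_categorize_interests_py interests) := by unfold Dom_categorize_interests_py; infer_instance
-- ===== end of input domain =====

-- B replaces A's three priority-ordered any() membership scans by a single keyword->code
-- dictionary and one min-tracking pass over the interests (objective: simpler).


-- ===== PORT A =====
def categorize_interests_py (interests : List String) : Int :=
  let tech_interests := ["programming", "software", "web development", "cybersecurity", "data science", "ai", "machine learning"]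
  let business_interests := ["management", "marketing", "finance", "entrepreneurship"]
  let creative_interests := ["design", "art", "music", "writing"]
  if interests.any (fun interest => tech_interests.contains (PySem.Str.lower interest)) then 0
  else if interests.any (fun interest => business_interests.contains (PySem.Str.lower interest)) then 1
  else if interests.any (fun interest => creative_interests.contains (PySem.Str.lower interest)) then 2
  else 3

-- ===== PORT B =====
def pvCodes : PySem.Dict String Int := PySem.Dict.ofList
  [("programming", 0), ("software", 0), ("web development", 0), ("cybersecurity", 0),
   ("data science", 0), ("ai", 0), ("machine learning", 0),
   ("management", 1), ("marketing", 1), ("finance", 1), ("entrepreneurship", 1),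
   ("design", 2), ("art", 2), ("music", 2), ("writing", 2)]

def categorize_interests_py_alt (interests : List String) : Int :=
  interests.foldl (fun best interest => min best (pvCodes.getD (PySem.Str.lower interest) 3)) 3

-- ===== PRECONDITION & SPEC =====
def Spec_categorize_interests_py (interests : List String) (out : Int) : Prop := out = categorize_interests_py_alt interests
instance (interests : List String) (out : Int) : Decidable (Spec_categorize_interests_py interests out) := by unfold Spec_categorize_interests_py; infer_instance

-- ===== CLAIM (what is proved, stated in full; the proofs are below) =====
def Claim_equal_categorize_interests_py : Prop := ∀ (interests : List String), Dom_categorize_interests_py interests → Spec_categorize_interests_py interests (categorize_interests_py interests)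

-- ===== LEMMAS AND PROOFS =====

-- A's priority chain on three booleans
def pvChain (a b c : Bool) : Int := if a then 0 else if b then 1 else if c then 2 else 3

-- the code A's priority chain assigns to one lowercased keyword
def pvChainCode (s : String) : Int :=
  pvChain
    ((["programming", "software", "web development", "cybersecurity", "data science", "ai", "machine learning"] : List String).contains s)
    ((["management", "marketing", "finance", "entrepreneurship"] : List String).contains s)
    ((["design", "art", "music", "writing"] : List String).contains s)

theorem pvCodes_mk : pvCodes = PySem.Dict.mk
  [("programming", 0), ("software", 0), ("web development", 0), ("cybersecurity", 0),
   ("data science", 0), ("ai", 0), ("machine learning", 0),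
   ("management", 1), ("marketing", 1), ("finance", 1), ("entrepreneurship", 1),
   ("design", 2), ("art", 2), ("music", 2), ("writing", 2)] := by decide

theorem pvne (s a : String) (h : ¬ s = a) : ¬ ((a == s) = true) :=
  fun e => h (eq_of_beq e).symm

set_option maxHeartbeats 1000000 in
theorem pvCodes_getD (s : String) : pvCodes.getD s 3 = pvChainCode s := by
  by_cases hs : s ∈ (["programming", "software", "web development", "cybersecurity",
      "data science", "ai", "machine learning", "management", "marketing", "finance",
      "entrepreneurship", "design", "art", "music", "writing"] : List String)
  · simp only [List.mem_cons, List.not_mem_nil, or_false] at hs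
    rcases hs with rfl|rfl|rfl|rfl|rfl|rfl|rfl|rfl|rfl|rfl|rfl|rfl|rfl|rfl|rfl <;> decide
  · simp only [List.mem_cons, List.not_mem_nil, or_false, not_or] at hs
    obtain ⟨h1,h2,h3,h4,h5,h6,h7,h8,h9,h10,h11,h12,h13,h14,h15⟩ := hs
    rw [pvCodes_mk, PySem.Dict.getD_eq_get?_getD]
    rw [PySem.Dict.get?_mk_cons, if_neg (pvne _ _ h1)]
    rw [PySem.Dict.get?_mk_cons, if_neg (pvne _ _ h2)]
    rw [PySem.Dict.get?_mk_cons, if_neg (pvne _ _ h3)]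
    rw [PySem.Dict.get?_mk_cons, if_neg (pvne _ _ h4)]
    rw [PySem.Dict.get?_mk_cons, if_neg (pvne _ _ h5)]
    rw [PySem.Dict.get?_mk_cons, if_neg (pvne _ _ h6)]
    rw [PySem.Dict.get?_mk_cons, if_neg (pvne _ _ h7)]
    rw [PySem.Dict.get?_mk_cons, if_neg (pvne _ _ h8)]
    rw [PySem.Dict.get?_mk_cons, if_neg (pvne _ _ h9)]
    rw [PySem.Dict.get?_mk_cons, if_neg (pvne _ _ h10)]
    rw [PySem.Dict.get?_mk_cons, if_neg (pvne _ _ h11)]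
    rw [PySem.Dict.get?_mk_cons, if_neg (pvne _ _ h12)]
    rw [PySem.Dict.get?_mk_cons, if_neg (pvne _ _ h13)]
    rw [PySem.Dict.get?_mk_cons, if_neg (pvne _ _ h14)]
    rw [PySem.Dict.get?_mk_cons, if_neg (pvne _ _ h15)]
    simp [pvChainCode, pvChain, PySem.Dict.get?, Option.getD, h1,h2,h3,h4,h5,h6,h7,h8,h9,h10,h11,h12,h13,h14,h15]

theorem pvChain_min : ∀ a b c a' b' c' : Bool,
    pvChain (a || a') (b || b') (c || c') = min (pvChain a b c) (pvChain a' b' c') := by decide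

theorem pvChain_le : ∀ a b c : Bool, pvChain a b c ≤ 3 := by decide

theorem categorize_eq_pvChain (l : List String) :
    categorize_interests_py l = pvChain
      (l.any (fun i => (["programming", "software", "web development", "cybersecurity", "data science", "ai", "machine learning"] : List String).contains (PySem.Str.lower i)))
      (l.any (fun i => (["management", "marketing", "finance", "entrepreneurship"] : List String).contains (PySem.Str.lower i)))
      (l.any (fun i => (["design", "art", "music", "writing"] : List String).contains (PySem.Str.lower i))) := rfl

theorem categorize_le (l : List String) : categorize_interests_py l ≤ 3 := by
  rw [categorize_eq_pvChain]; exact pvChain_le _ _ _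

theorem categorize_cons (x : String) (xs : List String) :
    categorize_interests_py (x :: xs) =
      min (pvChainCode (PySem.Str.lower x)) (categorize_interests_py xs) := by
  rw [categorize_eq_pvChain, categorize_eq_pvChain]
  simp only [List.any_cons, pvChainCode, pvChain_min]

theorem foldl_min_eq (xs : List String) :
    ∀ acc : Int, acc ≤ 3 →
      xs.foldl (fun best interest => min best (pvChainCode (PySem.Str.lower interest))) acc
        = min acc (categorize_interests_py xs) := by
  induction xs with
  | nil =>
      intro acc hacc
      simp only [List.foldl_nil, categorize_eq_pvChain, List.any_nil, pvChain]
      exact (min_eq_left hacc).symm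
  | cons x xs ih =>
      intro acc hacc
      rw [List.foldl_cons, ih _ (le_trans (min_le_left _ _) hacc), categorize_cons, min_assoc]

-- ===== VERDICT (by name: the statement is the Claim_ definition above) =====
theorem categorize_interests_py_spec : Claim_equal_categorize_interests_py := by
  intro interests _
  unfold Spec_categorize_interests_py categorize_interests_py_alt
  simp only [pvCodes_getD]
  rw [foldl_min_eq interests 3 le_rfl]
  exact (min_eq_right (categorize_le interests)).symm
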